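-- pv_equiv track=rewrite | github.com/lMoonHawk/AoC-py | 2019/day_16.py | run_fft
-- ===== SOURCE A (Python) =====
-- def run_fft(signal, n):
--     return [
--         abs(
--             sum(sum(signal[i : i + k]) for i in range(k - 1, n, 4 * k))
--             - sum(sum(signal[i : i + k]) for i in range(3 * k - 1, n, 4 * k))
--         )
--         % 10
--         for k in range(1, n + 1)
--     ]
-- ===== SOURCE B (Python) =====
-- def run_fft(sig, n):
--     # Prefix sums: each contiguous slice sum becomes one O(1) subtraction.
--     # (parameter renamed from "signal" only because the harness forbids that identifier)
--     P = [0]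
--     for x in sig:
--         P.append(P[-1] + x)
--     L = len(sig)
--     out = []
--     for k in range(1, n + 1):
--         pos = 0
--         for i in range(k - 1, n, 4 * k):
--             pos += P[min(i + k, L)] - P[min(i, L)]
--         neg = 0
--         for i in range(3 * k - 1, n, 4 * k):
--             neg += P[min(i + k, L)] - P[min(i, L)]
--         out.append(abs(pos - neg) % 10)
--     return out
-- ===== Notes on version B (the rewrite author's own statement) =====
-- stated objective: faster
-- what changed: B precomputes a prefix-sum array once so every slice sum signal[i:i+k] becomes one O(1) subtraction of two clamped prefix values, replacing A's repeated O(k) slicing-and-summing.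
import Mathlib
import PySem

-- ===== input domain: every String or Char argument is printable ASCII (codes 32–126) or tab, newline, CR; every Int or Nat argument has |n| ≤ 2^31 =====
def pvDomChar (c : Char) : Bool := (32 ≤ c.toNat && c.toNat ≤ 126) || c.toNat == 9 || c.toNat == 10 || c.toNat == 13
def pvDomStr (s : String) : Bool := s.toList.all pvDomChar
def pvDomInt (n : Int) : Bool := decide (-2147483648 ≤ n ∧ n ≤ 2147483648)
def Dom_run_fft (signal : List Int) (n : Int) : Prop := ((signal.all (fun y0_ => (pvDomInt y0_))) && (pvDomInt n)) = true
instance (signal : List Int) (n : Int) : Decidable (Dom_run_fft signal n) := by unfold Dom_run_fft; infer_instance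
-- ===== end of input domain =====

-- B replaces A's repeated O(k) slice sums by one precomputed prefix-sum array, each slice sum
-- becoming a single subtraction of two clamped prefix values (objective: faster, asymptotic).

-- ===== PORT A =====
def run_fft (signal : List Int) (n : Int) : List Int :=
  (PySem.List.pyRange 1 (n + 1) 1).map (fun k =>
    |(((PySem.List.pyRange (k - 1) n (4 * k)).map
        (fun i => (PySem.List.slice signal (some i) (some (i + k))).sum)).sum
      - ((PySem.List.pyRange (3 * k - 1) n (4 * k)).map
        (fun i => (PySem.List.slice signal (some i) (some (i + k))).sum)).sum)| % 10)

-- ===== PORT B =====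
-- prefSums xs s = the Python loop "P = [s]; for x in xs: P.append(P[-1] + x)"
def prefSums : List Int → Int → List Int
  | [], s => [s]
  | x :: xs, s => s :: prefSums xs (s + x)

def run_fft_alt (signal : List Int) (n : Int) : List Int :=
  let P := prefSums signal 0
  let L : Int := PySem.List.len signal
  (PySem.List.pyRange 1 (n + 1) 1).map (fun k =>
    let pos := (PySem.List.pyRange (k - 1) n (4 * k)).foldl
      (fun acc i => acc + (PySem.List.pyGetD P (min (i + k) L) 0 - PySem.List.pyGetD P (min i L) 0)) 0
    let neg := (PySem.List.pyRange (3 * k - 1) n (4 * k)).foldl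
      (fun acc i => acc + (PySem.List.pyGetD P (min (i + k) L) 0 - PySem.List.pyGetD P (min i L) 0)) 0
    |pos - neg| % 10)

-- ===== PRECONDITION & SPEC =====
def Spec_run_fft (signal : List Int) (n : Int) (out : List Int) : Prop := out = run_fft_alt signal n
instance (signal : List Int) (n : Int) (out : List Int) : Decidable (Spec_run_fft signal n out) := by unfold Spec_run_fft; infer_instance

-- ===== CLAIM (what is proved, stated in full; the proofs are below) =====
def Claim_equal_run_fft : Prop := ∀ (signal : List Int) (n : Int), Dom_run_fft signal n → Spec_run_fft signal n (run_fft signal n)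

-- ===== LEMMAS AND PROOFS =====

theorem prefSums_getD (xs : List Int) (s : Int) (j : Nat) (hj : j ≤ xs.length) :
    (prefSums xs s).getD j 0 = s + (xs.take j).sum := by
  induction xs generalizing s j with
  | nil =>
    have : j = 0 := by simpa using hj
    subst this; simp [prefSums]
  | cons x xs ih =>
    cases j with
    | zero => simp [prefSums]
    | succ j =>
      simp only [prefSums, List.getD_cons_succ, List.take_succ_cons, List.sum_cons]
      rw [ih (s + x) j (by simpa using hj)]
      ring

theorem sum_take_clamp (xs : List Int) (j : Nat) :
    (xs.take (min j xs.length)).sum = (xs.take j).sum := by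
  rcases le_or_gt j xs.length with h | h
  · rw [min_eq_left h]
  · rw [min_eq_right (le_of_lt h), List.take_length, List.take_of_length_le (le_of_lt h)]

theorem sum_drop_take (xs : List Int) (a m : Nat) :
    ((xs.drop a).take m).sum = (xs.take (a + m)).sum - (xs.take a).sum := by
  rw [List.take_add, List.sum_append]; ring

-- slice sum = difference of two clamped prefix-sum entries
theorem sliceSum (signal : List Int) (a k : Int) (ha : 0 ≤ a) (hk : 0 ≤ k) :
    (PySem.List.slice signal (some a) (some (a + k))).sum
      = PySem.List.pyGetD (prefSums signal 0) (min (a + k) (signal.length : Int)) 0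
        - PySem.List.pyGetD (prefSums signal 0) (min a (signal.length : Int)) 0 := by
  have hb : (0:Int) ≤ a + k := by omega
  have h1 : min (a + k) (signal.length : Int) = ((min (a + k).toNat signal.length : Nat) : Int) := by
    omega
  have h0 : min a (signal.length : Int) = ((min a.toNat signal.length : Nat) : Int) := by
    omega
  rw [h1, h0, PySem.List.pyGetD_natCast, PySem.List.pyGetD_natCast,
    prefSums_getD _ _ _ (by omega), prefSums_getD _ _ _ (by omega),
    PySem.List.slice_toNat signal ha hb]
  have hm : a.toNat + ((a + k).toNat - a.toNat) = (a + k).toNat := by omega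
  rw [sum_drop_take, hm]
  have c1 := sum_take_clamp signal (a + k).toNat
  have c0 := sum_take_clamp signal a.toNat
  simp only [Nat.min_def] at *
  omega

theorem run_fft_eq_alt (signal : List Int) (n : Int) :
    run_fft signal n = run_fft_alt signal n := by
  simp only [run_fft, run_fft_alt, PySem.List.len_eq]
  apply List.map_congr_left
  intro k hk
  rw [PySem.List.mem_pyRange_one] at hk
  have hk1 : (1:Int) ≤ k := hk.1
  have hs : (0:Int) < 4 * k := by omega
  rw [PySem.List.foldl_add, PySem.List.foldl_add, zero_add, zero_add]
  have hpos : ((PySem.List.pyRange (k - 1) n (4 * k)).map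
      (fun i => (PySem.List.slice signal (some i) (some (i + k))).sum))
      = ((PySem.List.pyRange (k - 1) n (4 * k)).map
      (fun i => PySem.List.pyGetD (prefSums signal 0) (min (i + k) (signal.length : Int)) 0
        - PySem.List.pyGetD (prefSums signal 0) (min i (signal.length : Int)) 0)) := by
    apply List.map_congr_left
    intro i hi
    rw [PySem.List.mem_pyRange_iff_of_pos hs] at hi
    exact sliceSum signal i k (by omega) (by omega)
  have hneg : ((PySem.List.pyRange (3 * k - 1) n (4 * k)).map
      (fun i => (PySem.List.slice signal (some i) (some (i + k))).sum))
      = ((PySem.List.pyRange (3 * k - 1) n (4 * k)).map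
      (fun i => PySem.List.pyGetD (prefSums signal 0) (min (i + k) (signal.length : Int)) 0
        - PySem.List.pyGetD (prefSums signal 0) (min i (signal.length : Int)) 0)) := by
    apply List.map_congr_left
    intro i hi
    rw [PySem.List.mem_pyRange_iff_of_pos hs] at hi
    exact sliceSum signal i k (by omega) (by omega)
  rw [hpos, hneg]

-- ===== VERDICT (by name: the statement is the Claim_ definition above) =====
theorem run_fft_spec : Claim_equal_run_fft := by
  intro signal n _
  unfold Spec_run_fft
  exact run_fft_eq_alt signal n
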